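-- pv_equiv track=rewrite | github.com/diogotorrinhas/Tetris-IA | AI_Functions.py | out_of_board
-- ===== SOURCE A (Python) =====
-- def out_of_board(piece):
--     min_x = 8
--     max_x = 1
--     for point in piece:
--         if min_x > point[0]:
--             min_x = point[0]
--         if max_x < point[0]:
--             max_x = point[0]
--     return min_x < 1 or max_x > 8
-- ===== SOURCE B (Python) =====
-- def out_of_board(piece):
--     return any(point[0] < 1 or point[0] > 8 for point in piece)
-- ===== Notes on version B (the rewrite author's own statement) =====
-- stated objective: simpler
-- what changed: Replaced min/max accumulator bookkeeping plus a final comparison with a short-circuiting existence test (any) of a per-point out-of-range predicate.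
import Mathlib
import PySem

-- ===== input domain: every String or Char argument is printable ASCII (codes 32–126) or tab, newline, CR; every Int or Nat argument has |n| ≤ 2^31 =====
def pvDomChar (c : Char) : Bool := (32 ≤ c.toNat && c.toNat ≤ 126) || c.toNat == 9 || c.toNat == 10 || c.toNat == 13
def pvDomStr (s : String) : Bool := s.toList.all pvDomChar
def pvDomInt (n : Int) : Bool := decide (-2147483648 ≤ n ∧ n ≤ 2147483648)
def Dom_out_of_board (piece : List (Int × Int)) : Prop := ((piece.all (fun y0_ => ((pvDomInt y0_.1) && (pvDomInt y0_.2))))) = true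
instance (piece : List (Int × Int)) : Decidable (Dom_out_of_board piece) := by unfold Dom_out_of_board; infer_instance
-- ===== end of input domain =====

-- B replaces A's min/max accumulator scan with a short-circuiting per-point existence test (objective: simpler).


-- ===== PORT A =====
-- A: track min_x/max_x over the piece, then compare to the board bounds.
def out_of_board (piece : List (Int × Int)) : Bool :=
  let st := piece.foldl (fun (mM : Int × Int) point =>
    let m := if mM.1 > point.1 then point.1 else mM.1
    let M := if mM.2 < point.1 then point.1 else mM.2
    (m, M)) (8, 1)
  decide (st.1 < 1) || decide (st.2 > 8)

-- ===== PORT B =====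
-- B: short-circuit existence test of a per-point out-of-range predicate.
def out_of_board_alt (piece : List (Int × Int)) : Bool :=
  piece.any (fun point => decide (point.1 < 1) || decide (point.1 > 8))

-- ===== PRECONDITION & SPEC =====
def Spec_out_of_board (piece : List (Int × Int)) (out : Bool) : Prop := out = out_of_board_alt piece
instance (piece : List (Int × Int)) (out : Bool) : Decidable (Spec_out_of_board piece out) := by unfold Spec_out_of_board; infer_instance

-- ===== CLAIM (what is proved, stated in full; the proofs are below) =====
def Claim_equal_out_of_board : Prop := ∀ (piece : List (Int × Int)), Dom_out_of_board piece → Spec_out_of_board piece (out_of_board piece)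

-- ===== LEMMAS AND PROOFS =====

-- ===== VERDICT (by name: the statement is the Claim_ definition above) =====
-- Loop invariant: the final min/max test equals the initial test OR'd with the existence test.
theorem out_of_board_fold_inv (piece : List (Int × Int)) (a b : Int) :
    (decide ((piece.foldl (fun (mM : Int × Int) point =>
      let m := if mM.1 > point.1 then point.1 else mM.1
      let M := if mM.2 < point.1 then point.1 else mM.2
      (m, M)) (a, b)).1 < 1) ||
     decide ((piece.foldl (fun (mM : Int × Int) point =>
      let m := if mM.1 > point.1 then point.1 else mM.1
      let M := if mM.2 < point.1 then point.1 else mM.2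
      (m, M)) (a, b)).2 > 8))
    = (decide (a < 1) || decide (b > 8) ||
       piece.any (fun point => decide (point.1 < 1) || decide (point.1 > 8))) := by
  induction piece generalizing a b with
  | nil => simp
  | cons p t ih =>
    simp only [List.foldl_cons, List.any_cons]
    by_cases h1 : a > p.1 <;> by_cases h2 : b < p.1
    · simp only [if_pos h1, if_pos h2]
      rw [ih]
      generalize t.any (fun point => decide (point.1 < 1) || decide (point.1 > 8)) = T
      cases T <;> (rw [Bool.eq_iff_iff]; simp; try omega)
    · simp only [if_pos h1, if_neg h2]
      rw [ih]
      generalize t.any (fun point => decide (point.1 < 1) || decide (point.1 > 8)) = T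
      cases T <;> (rw [Bool.eq_iff_iff]; simp; try omega)
    · simp only [if_neg h1, if_pos h2]
      rw [ih]
      generalize t.any (fun point => decide (point.1 < 1) || decide (point.1 > 8)) = T
      cases T <;> (rw [Bool.eq_iff_iff]; simp; try omega)
    · simp only [if_neg h1, if_neg h2]
      rw [ih]
      generalize t.any (fun point => decide (point.1 < 1) || decide (point.1 > 8)) = T
      cases T <;> (rw [Bool.eq_iff_iff]; simp; try omega)

theorem out_of_board_spec : Claim_equal_out_of_board := by
  intro piece _
  unfold Spec_out_of_board out_of_board out_of_board_alt
  exact out_of_board_fold_inv piece 8 1 |>.trans (by simp)
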